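-- pv_equiv track=rewrite | github.com/caovicto/ScheduleBuilder | Utilities/LineParsers.py | get_all_courses
-- ===== SOURCE A (Python) =====
-- import string
--
-- def get_all_courses(line):
--     """
--     returns list of all raw courses in line
--     :param line: (string) line to find courses in
--     [Course.py]
--     """
--     ret_array = []
--     line = line.translate(str.maketrans('', '', string.punctuation))
--     parsed = line.split()
--
--     for i in range(len(parsed)):
--         if parsed[i].isupper() and len(parsed[i]) >1:
--             try:
--                 ret_array.append(parsed[i]+parsed[i+1])
--             except IndexError:
--                 pass
--             i += 1
--
--     return ret_array
-- ===== SOURCE B (Python) =====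
-- import string
--
-- def get_all_courses(line):
--     """
--     returns list of all raw courses in line
--     (single pass over the characters: a small state machine with a token
--     buffer and a 'pending' qualifying token, no split/indexing)
--     """
--     res = []
--     pending = None          # previous token if it was all-upper and len > 1
--     buf = []                # characters of the token being built
--     for ch in line + ' ':   # trailing space flushes the final token
--         if ch in string.punctuation:
--             continue
--         if ch.isspace():
--             if buf:
--                 tok = ''.join(buf)
--                 if pending is not None:
--                     res.append(pending + tok)
--                 pending = tok if (tok.isupper() and len(tok) > 1) else None
--                 buf = []
--         else:
--             buf.append(ch)
--     return res
-- ===== Notes on version B (the rewrite author's own statement) =====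
-- stated objective: alternative
-- what changed: Replaces A's strip-punctuation/split/indexed-loop-with-try-except pipeline by a single character-level pass: a state machine that skips punctuation characters, builds the current token in a buffer, remembers the previous qualifying (all-upper, length>1) token, and emits its concatenation with each newly completed token; an unfinished remembered token at end of line is naturally dropped, which reproduces A's caught IndexError on the last word.
import Mathlib
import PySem

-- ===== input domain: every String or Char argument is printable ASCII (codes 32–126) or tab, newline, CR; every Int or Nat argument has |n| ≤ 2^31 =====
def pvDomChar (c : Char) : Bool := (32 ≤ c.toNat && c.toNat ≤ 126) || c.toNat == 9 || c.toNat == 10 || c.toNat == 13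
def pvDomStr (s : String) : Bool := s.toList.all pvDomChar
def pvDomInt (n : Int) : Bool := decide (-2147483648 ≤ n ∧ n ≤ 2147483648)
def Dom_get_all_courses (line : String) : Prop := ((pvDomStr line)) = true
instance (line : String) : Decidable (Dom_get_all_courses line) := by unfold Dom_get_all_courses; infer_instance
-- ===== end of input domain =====

-- B replaces A's strip/split/indexed loop (with its try/except lookahead) by a single
-- character-level pass: a state machine with a token buffer and a remembered qualifying
-- token (objective: alternative decomposition, same cost).

-- ===== PORT A =====
-- string.punctuation = ASCII 33–47, 58–64, 91–96, 123–126 (exact for the ASCII domain)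
def pyIsPunct (c : Char) : Bool :=
  (33 ≤ c.toNat && c.toNat ≤ 47) || (58 ≤ c.toNat && c.toNat ≤ 64) ||
  (91 ≤ c.toNat && c.toNat ≤ 96) || (123 ≤ c.toNat && c.toNat ≤ 126)

-- Python str.isupper(): some cased character, and no lowercase cased character
-- (cased = alphabetic on the ASCII domain; exact there)
def pyIsupperStr (cs : List Char) : Bool :=
  cs.any PySem.Chars.isalpha && cs.all (fun c => ! PySem.Chars.islower c)

def get_all_courses (line : String) : List String :=
  let parsed := PySem.Chars.split₀ (line.toList.filter (fun c => ! pyIsPunct c))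
  (List.range parsed.length).foldl (fun acc (i : Nat) =>
    match PySem.List.pyGet? parsed ((i : Int)) with
    | some t =>
      if pyIsupperStr t && decide (1 < t.length) then
        -- try: append parsed[i] + parsed[i+1]  except IndexError: pass
        match PySem.List.pyGet? parsed ((i : Int) + 1) with
        | some nxt => acc ++ [String.ofList (t ++ nxt)]
        | none => acc
      else acc
    | none => acc) []

-- ===== PORT B =====
-- state = (res, pending, buf): result so far, previous qualifying token, current buffer
def bStep (st : List String × Option (List Char) × List Char) (ch : Char) :
    List String × Option (List Char) × List Char :=
  if pyIsPunct ch then st                      -- continue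
  else if PySem.Chars.isspace ch then
    if st.2.2.isEmpty then st
    else
      let tok := st.2.2                        -- tok = ''.join(buf)
      ((match st.2.1 with
        | some p => st.1 ++ [String.ofList (p ++ tok)]
        | none => st.1),
       (if pyIsupperStr tok && decide (1 < tok.length) then some tok else none),
       [])
  else (st.1, st.2.1, st.2.2 ++ [ch])          -- buf.append(ch)

def get_all_courses_alt (line : String) : List String :=
  ((line.toList ++ [' ']).foldl bStep ([], none, [])).1

-- ===== PRECONDITION & SPEC =====
def Spec_get_all_courses (line : String) (out : List String) : Prop := out = get_all_courses_alt line
instance (line : String) (out : List String) : Decidable (Spec_get_all_courses line out) := by unfold Spec_get_all_courses; infer_instance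

-- ===== CLAIM =====
def Claim_equal_get_all_courses : Prop := ∀ (line : String), Dom_get_all_courses line → Spec_get_all_courses line (get_all_courses line)

-- ===== LEMMAS AND PROOFS =====

-- a token qualifies if it is 'isupper' and longer than 1
def qualOpt (t : List Char) : Option (List Char) :=
  if pyIsupperStr t && decide (1 < t.length) then some t else none

-- the qualifying-adjacent-pair view both ports are reduced to
def pairsFilter (ts : List (List Char)) : List String :=
  (ts.zip (ts.drop 1)).filterMap (fun p =>
    if pyIsupperStr p.1 && decide (1 < p.1.length) then some (String.ofList (p.1 ++ p.2))
    else none)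

-- Python split() with an explicit (un-reversed) current buffer
def tokensWith : List Char → List Char → List (List Char)
  | buf, [] => if buf.isEmpty then [] else [buf]
  | buf, c :: rest =>
    if PySem.Chars.isspace c then
      if buf.isEmpty then tokensWith [] rest else buf :: tokensWith [] rest
    else tokensWith (buf ++ [c]) rest

-- what B's state machine emits from a pending token over a token stream
def emitAll : Option (List Char) → List (List Char) → List String
  | _, [] => []
  | none, t :: ts => emitAll (qualOpt t) ts
  | some p, t :: ts => String.ofList (p ++ t) :: emitAll (qualOpt t) ts

def headEmit : Option (List Char) → List (List Char) → List String
  | some p, t :: _ => [String.ofList (p ++ t)]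
  | _, _ => []

theorem go_eq (cs : List Char) : ∀ (cur : List Char) (acc : List (List Char)),
    PySem.Chars.split₀.go cs cur acc = acc.reverse ++ tokensWith cur.reverse cs := by
  induction cs with
  | nil =>
    intro cur acc
    by_cases h : cur = []
    · subst h
      simp [PySem.Chars.split₀.go, tokensWith]
    · have h' : cur.isEmpty = false := by simp [h]
      have h'' : cur.reverse.isEmpty = false := by simp [h]
      simp [PySem.Chars.split₀.go, tokensWith, h', h'']
  | cons c rest ih =>
    intro cur acc
    rw [PySem.Chars.split₀.go]
    by_cases hs : PySem.Chars.isspace c = true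
    · rw [if_pos hs]
      by_cases h : cur = []
      · subst h
        rw [if_pos (show ([] : List Char).isEmpty = true from rfl), ih]
        simp [tokensWith, hs]
      · have h' : cur.isEmpty = false := by simp [h]
        have h'' : cur.reverse.isEmpty = false := by simp [h]
        rw [if_neg (by simp [h']), ih]
        have ht : tokensWith cur.reverse (c :: rest)
            = cur.reverse :: tokensWith [] rest := by
          simp [tokensWith, hs, h'']
        rw [ht]
        simp
    · rw [if_neg hs, ih]
      have ht : tokensWith cur.reverse (c :: rest)
          = tokensWith (cur.reverse ++ [c]) rest := by
        simp [tokensWith, hs]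
      rw [ht]
      have : cur.reverse ++ [c] = (c :: cur).reverse := by simp
      rw [this]

theorem split₀_eq_tokensWith (cs : List Char) :
    PySem.Chars.split₀ cs = tokensWith [] cs := by
  simpa using go_eq cs [] []

theorem emit_eq_pairs (ts : List (List Char)) : ∀ (p? : Option (List Char)),
    emitAll p? ts = headEmit p? ts ++ pairsFilter ts := by
  induction ts with
  | nil => intro p?; cases p? <;> simp [emitAll, headEmit, pairsFilter]
  | cons t ts ih =>
    intro p?
    have hstep : pairsFilter (t :: ts) = headEmit (qualOpt t) ts ++ pairsFilter ts := by
      cases ts with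
      | nil => simp [pairsFilter, headEmit, qualOpt]
      | cons u rest =>
        simp only [pairsFilter, List.drop_succ_cons, List.drop_zero, List.zip_cons_cons,
          List.filterMap_cons]
        by_cases hq : (pyIsupperStr t && decide (1 < t.length)) = true
        · simp [hq, headEmit, qualOpt]
        · simp only [Bool.not_eq_true] at hq
          simp [hq, headEmit, qualOpt]
    cases p? with
    | none => simp [emitAll, headEmit, ih, hstep]
    | some p => simp [emitAll, headEmit, ih, hstep]

theorem bfold_eq (cs : List Char) :
    ∀ (res : List String) (pending : Option (List Char)) (buf : List Char),
    ((cs ++ [' ']).foldl bStep (res, pending, buf)).1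
      = res ++ emitAll pending (tokensWith buf (cs.filter (fun c => ! pyIsPunct c))) := by
  induction cs with
  | nil =>
    intro res pending buf
    have hp : pyIsPunct ' ' = false := by decide
    have hs : PySem.Chars.isspace ' ' = true := by decide
    rw [List.nil_append, List.foldl_cons, List.foldl_nil, List.filter_nil]
    by_cases hb : buf = []
    · subst hb
      simp [bStep, hp, hs, tokensWith, emitAll]
    · have hbe : buf.isEmpty = false := by simp [hb]
      cases pending with
      | none => simp [bStep, hp, hs, hbe, tokensWith, emitAll]
      | some p => simp [bStep, hp, hs, hbe, tokensWith, emitAll]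
  | cons c rest ih =>
    intro res pending buf
    rw [List.cons_append, List.foldl_cons, List.filter_cons]
    by_cases hp : pyIsPunct c = true
    · have hstep : bStep (res, pending, buf) c = (res, pending, buf) := by
        simp [bStep, hp]
      rw [hstep, ih, if_neg (by simp [hp])]
    · rw [if_pos (by simp [hp])]
      by_cases hs : PySem.Chars.isspace c = true
      · by_cases hb : buf = []
        · subst hb
          have hstep : bStep (res, pending, []) c = (res, pending, []) := by
            simp [bStep, hp, hs]
          rw [hstep, ih]
          have ht : tokensWith [] (c :: List.filter (fun c => !pyIsPunct c) rest)
              = tokensWith [] (List.filter (fun c => !pyIsPunct c) rest) := by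
            simp [tokensWith, hs]
          rw [ht]
        · have hbe : buf.isEmpty = false := by simp [hb]
          have hstep : bStep (res, pending, buf) c
              = ((match pending with
                  | some p => res ++ [String.ofList (p ++ buf)]
                  | none => res),
                 qualOpt buf, []) := by
            simp [bStep, hp, hs, hbe, qualOpt]
          rw [hstep, ih]
          have ht : tokensWith buf (c :: List.filter (fun c => !pyIsPunct c) rest)
              = buf :: tokensWith [] (List.filter (fun c => !pyIsPunct c) rest) := by
            simp [tokensWith, hs, hbe]
          rw [ht]
          cases pending with
          | none => simp [emitAll]
          | some p => simp [emitAll]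
      · have hstep : bStep (res, pending, buf) c = (res, pending, buf ++ [c]) := by
          simp [bStep, hp, hs]
        rw [hstep, ih]
        have ht : tokensWith buf (c :: List.filter (fun c => !pyIsPunct c) rest)
            = tokensWith (buf ++ [c]) (List.filter (fun c => !pyIsPunct c) rest) := by
          simp [tokensWith, hs]
        rw [ht]

theorem foldl_range_shift {α : Type} (f : α → Nat → α) (n : Nat) (a : α) :
    (List.range (n + 1)).foldl f a = (List.range n).foldl (fun a i => f a (i + 1)) (f a 0) := by
  rw [List.range_succ_eq_map]
  simp [List.foldl_map]

theorem loop_eq (l : List (List Char)) (acc : List String) :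
    (List.range l.length).foldl (fun acc (i : Nat) =>
      match PySem.List.pyGet? l ((i : Int)) with
      | some t =>
        if pyIsupperStr t && decide (1 < t.length) then
          match PySem.List.pyGet? l ((i : Int) + 1) with
          | some nxt => acc ++ [String.ofList (t ++ nxt)]
          | none => acc
        else acc
      | none => acc) acc
    = acc ++ pairsFilter l := by
  induction l generalizing acc with
  | nil => simp [pairsFilter]
  | cons x xs ih =>
    simp only [List.length_cons]
    rw [foldl_range_shift]
    have hfun : (fun (a : List String) (i : Nat) =>
        (match PySem.List.pyGet? (x :: xs) (((i + 1 : Nat) : Int)) with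
        | some t =>
          if pyIsupperStr t && decide (1 < t.length) then
            match PySem.List.pyGet? (x :: xs) (((i + 1 : Nat) : Int) + 1) with
            | some nxt => a ++ [String.ofList (t ++ nxt)]
            | none => a
          else a
        | none => a))
        = (fun (a : List String) (i : Nat) =>
        match PySem.List.pyGet? xs ((i : Int)) with
        | some t =>
          if pyIsupperStr t && decide (1 < t.length) then
            match PySem.List.pyGet? xs ((i : Int) + 1) with
            | some nxt => a ++ [String.ofList (t ++ nxt)]
            | none => a
          else a
        | none => a) := by
      funext a i
      have h1 : PySem.List.pyGet? (x :: xs) (((i + 1 : Nat) : Int))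
          = PySem.List.pyGet? xs ((i : Int)) := by
        simp [PySem.List.pyGet?_natCast]
      have h2 : PySem.List.pyGet? (x :: xs) (((i + 1 : Nat) : Int) + 1)
          = PySem.List.pyGet? xs ((i : Int) + 1) := by
        have e1 : ((i + 1 : Nat) : Int) + 1 = ((i + 2 : Nat) : Int) := by push_cast; ring
        have e2 : ((i : Int)) + 1 = ((i + 1 : Nat) : Int) := by push_cast; ring
        rw [e1, e2]
        simp only [PySem.List.pyGet?_natCast, List.getElem?_cons_succ]
      rw [h1, h2]
    rw [hfun, ih]
    cases xs with
    | nil =>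
      have h1 : PySem.List.pyGet? [x] (((0 : Nat) : Int) + 1) = none := by
        simp [PySem.List.pyGet?, PySem.List.pyIdx?]
      simp only [h1]
      cases hg : PySem.List.pyGet? [x] ((0 : Nat) : Int) <;> simp [pairsFilter]
    | cons y ys =>
      have h0 : PySem.List.pyGet? (x :: y :: ys) ((0 : Nat) : Int) = some x := by
        simp
      have h1 : PySem.List.pyGet? (x :: y :: ys) (((0 : Nat) : Int) + 1) = some y := by
        have : ((0 : Nat) : Int) + 1 = ((1 : Nat) : Int) := by norm_num
        rw [this]; simp
      simp only [h0, h1]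
      by_cases hc : (pyIsupperStr x && decide (1 < x.length)) = true
      · simp only [Bool.and_eq_true, decide_eq_true_eq] at hc
        simp [hc, pairsFilter]
      · simp only [Bool.and_eq_true, decide_eq_true_eq, not_and_or] at hc
        rcases hc with hc | hc <;> simp [hc, pairsFilter]

-- ===== VERDICT =====
theorem get_all_courses_spec : Claim_equal_get_all_courses := by
  intro line _
  unfold Spec_get_all_courses get_all_courses get_all_courses_alt
  rw [loop_eq, bfold_eq, split₀_eq_tokensWith]
  rw [emit_eq_pairs]
  simp [headEmit]
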